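-- pv_equiv track=rewrite | github.com/subinmun1997/my_python-for-coding-test | BAEKJOON/코테재활/프로그래머스 재활/level2/귤 고르기.py | solution
-- ===== SOURCE A (Python) =====
-- from collections import Counter
--
-- def solution(k, tangerine):
--     cnt = Counter(tangerine)
--
--     result = 0
--     for v in sorted(cnt.values(), reverse=True):
--         k -= v
--         result += 1
--         if k <= 0:
--             break
--
--     return result
-- ===== SOURCE B (Python) =====
-- def solution(k, tangerine):
--     # Counting-sort variant: bucket the frequencies and walk the buckets from
--     # the largest frequency down, instead of comparison-sorting the counts.
--     cnt = {}
--     for t in tangerine: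
--         cnt[t] = cnt.get(t, 0) + 1
--     freq = {}
--     maxc = 0
--     for c in cnt.values():
--         freq[c] = freq.get(c, 0) + 1
--         maxc = max(maxc, c)
--     result = 0
--     for c in range(maxc, 0, -1):
--         for _ in range(freq.get(c, 0)):
--             k -= c
--             result += 1
--             if k <= 0:
--                 return result
--     return result
-- ===== Notes on version B (the rewrite author's own statement) =====
-- stated objective: alternative
-- what changed: Replaces the comparison sort of the distinct counts by a count-of-counts bucket table walked from the largest frequency down (counting sort), with the same subtract-then-check early exit.
import Mathlib
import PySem

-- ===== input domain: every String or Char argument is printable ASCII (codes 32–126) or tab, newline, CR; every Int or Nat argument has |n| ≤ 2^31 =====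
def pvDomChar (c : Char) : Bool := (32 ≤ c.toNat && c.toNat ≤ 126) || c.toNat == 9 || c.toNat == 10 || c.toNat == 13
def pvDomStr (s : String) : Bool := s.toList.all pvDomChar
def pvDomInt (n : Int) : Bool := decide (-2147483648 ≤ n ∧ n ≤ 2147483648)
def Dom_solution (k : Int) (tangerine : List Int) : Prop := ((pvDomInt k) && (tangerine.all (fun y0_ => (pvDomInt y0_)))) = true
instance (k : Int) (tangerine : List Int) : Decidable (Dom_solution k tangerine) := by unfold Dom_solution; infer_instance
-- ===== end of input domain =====

-- B replaces A's comparison sort of the counts by a count-of-counts bucket walk (counting sort): an alternative algorithm returning the same value everywhere.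

-- ===== PORT A =====
-- the 'for v in …: k -= v; result += 1; if k <= 0: break' loop
def pvLoopA : Int → Int → List Int → Int
  | _, result, [] => result
  | k, result, v :: vs =>
      let k' := k - v
      let r' := result + 1
      if k' ≤ 0 then r' else pvLoopA k' r' vs

def solution (k : Int) (tangerine : List Int) : Int :=
  let cnt := PySem.Dict.counter tangerine
  pvLoopA k 0 (PySem.List.sorted cnt.values (fun x => x) true)

-- ===== PORT B =====
-- inner 'for _ in range(m): k -= c; result += 1; if k <= 0: return result' (inl = early return)
def pvInnerB (c : Int) : Nat → Int → Int → Sum Int (Int × Int)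
  | 0, k, result => Sum.inr (k, result)
  | m + 1, k, result =>
      let k' := k - c
      let r' := result + 1
      if k' ≤ 0 then Sum.inl r' else pvInnerB c m k' r'

-- outer 'for c in range(maxc, 0, -1)' loop; f c = freq.get(c, 0) bucket size
def pvOuterB : List Int → (Int → Nat) → Int → Int → Int
  | [], _, _, result => result
  | c :: cs, f, k, result =>
      match pvInnerB c (f c) k result with
      | Sum.inl r => r
      | Sum.inr (k', r') => pvOuterB cs f k' r'

def solution_alt (k : Int) (tangerine : List Int) : Int :=
  let cnt : PySem.Dict Int Int :=
    tangerine.foldl (fun d t => d.insert t (d.getD t 0 + 1)) PySem.Dict.empty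
  let fm : PySem.Dict Int Int × Int :=
    cnt.values.foldl (fun s c => (s.1.insert c (s.1.getD c 0 + 1), max s.2 c)) (PySem.Dict.empty, 0)
  pvOuterB (PySem.List.pyRange fm.2 0 (-1)) (fun c => ((fm.1.getD c 0).toNat)) k 0

-- ===== PRECONDITION & SPEC =====
def Spec_solution (k : Int) (tangerine : List Int) (out : Int) : Prop := out = solution_alt k tangerine
instance (k : Int) (tangerine : List Int) (out : Int) : Decidable (Spec_solution k tangerine out) := by unfold Spec_solution; infer_instance

-- ===== CLAIM (what is proved, stated in full; the proofs are below) =====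
def Claim_equal_solution : Prop := ∀ (k : Int) (tangerine : List Int), Dom_solution k tangerine → Spec_solution k tangerine (solution k tangerine)

-- ===== LEMMAS AND PROOFS =====

-- inner loop = A's loop on a block of (f c) copies of c, with the rest as continuation
theorem pvInner_loopA (c : Int) (m : Nat) (k r : Int) (rest : List Int) :
    pvLoopA k r (List.replicate m c ++ rest) =
      (match pvInnerB c m k r with
       | Sum.inl out => out
       | Sum.inr (k', r') => pvLoopA k' r' rest) := by
  induction m generalizing k r with
  | zero => simp [pvInnerB]
  | succ n ih =>
      simp only [List.replicate_succ, List.cons_append, pvLoopA, pvInnerB]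
      split_ifs with h
      · rfl
      · exact ih _ _

-- outer loop = A's loop on the concatenation of the blocks
theorem pvOuter_loopA (cs : List Int) (f : Int → Nat) (k r : Int) :
    pvLoopA k r (cs.flatMap (fun c => List.replicate (f c) c)) = pvOuterB cs f k r := by
  induction cs generalizing k r with
  | nil => simp [pvOuterB, pvLoopA]
  | cons c cs ih =>
      simp only [List.flatMap_cons, pvOuterB]
      rw [pvInner_loopA]
      cases h : pvInnerB c (f c) k r with
      | inl out => simp
      | inr p => simpa using ih p.1 p.2

-- count of a in the concatenation of blocks over a Nodup list cs
theorem count_flatMap_replicate (cs : List Int) (hnd : cs.Nodup) (f : Int → Nat) (a : Int) :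
    (cs.flatMap (fun c => List.replicate (f c) c)).count a = if a ∈ cs then f a else 0 := by
  induction cs with
  | nil => simp
  | cons c cs ih =>
      simp only [List.flatMap_cons, List.count_append, List.count_replicate,
        List.mem_cons]
      rcases List.nodup_cons.mp hnd with ⟨hc, hnd'⟩
      by_cases hac : a = c
      · subst hac
        simp [ih hnd', hc]
      · rw [ih hnd']
        simp only [hac, false_or]
        have : ¬ c = a := fun h => hac h.symm
        simp [this]

-- blocks over a strictly descending cs are pairwise descending
theorem pairwise_flatMap_replicate (cs : List Int) (h : cs.Pairwise (fun a b => b < a))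
    (f : Int → Nat) :
    (cs.flatMap (fun c => List.replicate (f c) c)).Pairwise (fun a b => b ≤ a) := by
  induction h with
  | nil => simp
  | cons hc hp ih =>
      simp only [List.flatMap_cons]
      rw [List.pairwise_append]
      refine ⟨List.pairwise_replicate_of_refl, ih, ?_⟩
      intro x hx y hy
      rcases List.eq_of_mem_replicate hx with rfl
      rcases List.mem_flatMap.mp hy with ⟨d, hd, hy2⟩
      rcases List.eq_of_mem_replicate hy2 with rfl
      exact le_of_lt (hc _ hd)

-- key characterisation: A's reverse-sorted values list IS B's bucket concatenation
theorem sorted_eq_blocks (vs : List Int) (maxc : Int)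
    (hpos : ∀ v ∈ vs, 1 ≤ v) (hmax : ∀ v ∈ vs, v ≤ maxc) :
    PySem.List.sorted vs (fun x => x) true =
      (PySem.List.pyRange maxc 0 (-1)).flatMap
        (fun c => List.replicate (vs.count c) c) := by
  have hnd : (PySem.List.pyRange maxc 0 (-1)).Nodup := by
    rw [PySem.List.pyRange_neg_one_eq_reverse]
    exact List.nodup_reverse.mpr (PySem.List.nodup_pyRange_one _ _)
  have hperm : (PySem.List.sorted vs (fun x => x) true).Perm
      ((PySem.List.pyRange maxc 0 (-1)).flatMap (fun c => List.replicate (vs.count c) c)) := by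
    refine (List.perm_iff_count).mpr (fun a => ?_)
    rw [(PySem.List.sorted_perm vs (fun x => x) true).count_eq,
        count_flatMap_replicate _ hnd]
    by_cases ha : a ∈ PySem.List.pyRange maxc 0 (-1)
    · simp [ha]
    · simp only [ha, if_false]
      rw [PySem.List.mem_pyRange_neg_one] at ha
      push Not at ha
      rw [List.count_eq_zero]
      intro hmem
      have h1 := hpos a hmem
      have h2 := hmax a hmem
      omega
  refine hperm.eq_of_pairwise (fun a b _ _ h1 h2 => le_antisymm h2 h1) ?_ ?_
  · exact PySem.List.sorted_pairwise_rev vs (fun x => x)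
  · apply pairwise_flatMap_replicate
    rw [PySem.List.pyRange_neg_one_eq_reverse]
    exact (List.pairwise_reverse).mpr (PySem.List.pairwise_lt_pyRange_one _ _)

-- ===== VERDICT (by name: the statement is the Claim_ definition above) =====
theorem values_counter_pos (xs : List Int) : ∀ v ∈ (PySem.Dict.counter xs).values, 1 ≤ v := by
  intro v hv
  have hitems := PySem.Dict.items_counter (xs := xs)
  have : (PySem.Dict.counter xs).values = (PySem.Set.ofList xs).map (fun k => (xs.count k : Int)) := by
    simp [PySem.Dict.values, hitems]
  rw [this] at hv
  rcases List.mem_map.mp hv with ⟨x, hx, rfl⟩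
  have hmem : x ∈ xs := (PySem.Set.mem_ofList _ _).mp hx
  have := List.count_pos_iff.mpr hmem
  omega

theorem solution_spec : Claim_equal_solution := by
  intro k tangerine _
  show solution k tangerine = solution_alt k tangerine
  unfold solution solution_alt
  simp only []
  have hcnt : (tangerine.foldl (fun d t => d.insert t (d.getD t 0 + 1)) PySem.Dict.empty)
      = PySem.Dict.counter tangerine := rfl
  rw [hcnt]
  set vs := (PySem.Dict.counter tangerine).values with hvs
  rw [PySem.List.foldl_prod_mk (f := fun d c => PySem.Dict.insert d c (d.getD c 0 + 1))
        (g := fun m c => max m c)]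
  have hfreq : (vs.foldl (fun d c => PySem.Dict.insert d c (d.getD c 0 + 1)) PySem.Dict.empty)
      = PySem.Dict.counter vs := rfl
  rw [hfreq]
  set maxc := vs.foldl (fun m c => max m c) 0 with hmaxc
  have hf : (fun c => ((PySem.Dict.counter vs).getD c 0).toNat) = (fun c => vs.count c) := by
    funext c
    rw [PySem.Dict.getD_counter]
    exact Int.toNat_natCast _
  rw [hf, ← pvOuter_loopA]
  congr 1
  apply sorted_eq_blocks
  · exact values_counter_pos tangerine
  · intro v hv
    have := PySem.List.le_foldl_max vs 0
    exact this.2 v hv
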